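-- pv_equiv track=rewrite | github.com/Yuuraa/Python-Algorithm | Leetcode/JAN_2021/concat_binaries.py | concatenate_binary_time_exception
-- ===== SOURCE A (Python) =====
-- def concatenate_binary_time_exception(n):
--     result, len_str = 0, 0
--     for num in range(n, 0, -1):
--         bin_str = bin(num)[2:]
--         result += num << len_str
--         len_str += len(bin_str)
--         result = result % (int(1e9) + 7)
--
--     return result
-- ===== SOURCE B (Python) =====
-- def concatenate_binary_time_exception(n):
--     MOD = 10 ** 9 + 7
--     res = 0
--     shift = 2   # 2 ** (bit length of the current i)
--     limit = 2   # smallest power of two strictly greater than the numbers seen so far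
--     i = 1
--     while i <= n:
--         if i == limit:
--             shift *= 2
--             limit *= 2
--         res = (res * shift + i) % MOD
--         i += 1
--     return res
-- ===== Notes on version B (the rewrite author's own statement) =====
-- stated objective: faster
-- what changed: Instead of prepending each number to a growing big integer with `num << len_str` (the shifted accumulator has Theta(n log n) bits, so each step costs Theta(n log n) bit operations), B runs a forward loop keeping only the mod-p residue and a small power-of-two factor 2^bitlen(i), doubled exactly when i reaches the next power of two, so every step is O(1) arithmetic on machine-size values.
import Mathlib
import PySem

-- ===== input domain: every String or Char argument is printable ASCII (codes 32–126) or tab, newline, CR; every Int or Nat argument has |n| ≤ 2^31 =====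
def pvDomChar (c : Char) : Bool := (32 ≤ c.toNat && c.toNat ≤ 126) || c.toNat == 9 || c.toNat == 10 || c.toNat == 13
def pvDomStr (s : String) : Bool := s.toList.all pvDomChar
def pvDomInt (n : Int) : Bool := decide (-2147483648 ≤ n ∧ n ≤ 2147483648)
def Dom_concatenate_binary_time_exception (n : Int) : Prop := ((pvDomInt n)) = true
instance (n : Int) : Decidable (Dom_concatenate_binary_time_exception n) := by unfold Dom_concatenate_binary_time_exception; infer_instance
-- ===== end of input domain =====

-- B replaces A's growing-bigint shift accumulator by a forward loop on mod-p residues with a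
-- maintained power-of-two factor (measured asymptotically faster in a timing run).


-- ===== PORT A =====
-- for num in range(n, 0, -1): bin_str = bin(num)[2:]; result += num << len_str;
-- len_str += len(bin_str); result %= 10**9+7.  State is (result, len_str); len_str stays ≥ 0,
-- so `num << len_str` is core `Int.shiftLeft num len_str.toNat` (exact here).  int(1e9) + 7 = 1000000007.
def concatenate_binary_time_exception (n : Int) : Int :=
  ((PySem.List.pyRange n 0 (-1)).foldl
    (fun st num =>
      let bin_str := PySem.List.slice (PySem.Int.toBinChars0b num) (some 2) none  -- bin(num)[2:]
      let result := st.1 + (Int.shiftLeft num st.2.toNat)  -- num << len_str (len_str ≥ 0 in the loop)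
      let len_str := st.2 + (bin_str.length : Int)
      (PySem.Int.mod result 1000000007, len_str))
    (0, 0)).1

-- ===== PORT B =====
-- while i <= n: if i == limit: shift *= 2; limit *= 2; res = (res*shift + i) % MOD; i += 1
def pyAltLoop (n i res shift limit : Int) : Int :=
  if _h : i ≤ n then
    let sl := if i == limit then (shift * 2, limit * 2) else (shift, limit)
    pyAltLoop n (i + 1) (PySem.Int.mod (res * sl.1 + i) 1000000007) sl.1 sl.2
  else res
termination_by (n + 1 - i).toNat
decreasing_by omega

def concatenate_binary_time_exception_alt (n : Int) : Int :=
  pyAltLoop n 1 0 2 2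

-- ===== PRECONDITION & SPEC =====
def Spec_concatenate_binary_time_exception (n : Int) (out : Int) : Prop := out = concatenate_binary_time_exception_alt n
instance (n : Int) (out : Int) : Decidable (Spec_concatenate_binary_time_exception n out) := by unfold Spec_concatenate_binary_time_exception; infer_instance

-- ===== CLAIM (what is proved, stated in full; the proofs are below) =====
def Claim_equal_concatenate_binary_time_exception : Prop := ∀ (n : Int), Dom_concatenate_binary_time_exception n → Spec_concatenate_binary_time_exception n (concatenate_binary_time_exception n)

-- ===== LEMMAS AND PROOFS =====

-- bit length of a natural number, the common yardstick of both proofs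
def pvBl (m : Nat) : Nat := PySem.Int.bitLength (m : Int)

-- the common mathematical reference value: concatenation of 1..m, reduced mod p at each step
def pvG : Nat → Int
  | 0 => 0
  | m + 1 => (pvG m * 2 ^ (pvBl (m + 1)) + ((m : Int) + 1)) % 1000000007

lemma pvBl_lt (m : Nat) : m < 2 ^ pvBl m := by
  have h := PySem.Int.lt_two_pow_bitLength (m : Int)
  simpa [pvBl] using h

lemma pvBl_ge (m : Nat) (hm : 0 < m) : 2 ^ (pvBl m - 1) ≤ m := by
  have h := PySem.Int.two_pow_bitLength_le (m : Int) (by exact_mod_cast hm.ne')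
  simpa [pvBl] using h

lemma pvBl_pos (m : Nat) (hm : 0 < m) : 0 < pvBl m := by
  by_contra h
  have h0 : pvBl m = 0 := by omega
  have := pvBl_lt m
  rw [h0] at this
  omega

lemma pvBl_eq_of (k t : Nat) (ht : 1 ≤ t) (h1 : 2 ^ (t - 1) ≤ k) (h2 : k < 2 ^ t) :
    pvBl k = t := by
  have hk : 0 < k := lt_of_lt_of_le (Nat.pow_pos (by norm_num)) h1
  have hs := pvBl_pos k hk
  have hl := pvBl_lt k
  have hg := pvBl_ge k hk
  -- 2^(t-1) ≤ k < 2^(pvBl k) and 2^(pvBl k - 1) ≤ k < 2^t force equality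
  have h₁ : t - 1 < pvBl k := by
    have := lt_of_le_of_lt h1 hl
    exact (Nat.pow_lt_pow_iff_right (by norm_num)).mp this
  have h₂ : pvBl k - 1 < t := by
    have := lt_of_le_of_lt hg h2
    exact (Nat.pow_lt_pow_iff_right (by norm_num)).mp this
  omega

lemma pvBl_succ_pow (m : Nat) (hm : 0 < m) (h : m + 1 = 2 ^ pvBl m) :
    pvBl (m + 1) = pvBl m + 1 := by
  refine pvBl_eq_of _ _ (by omega) ?_ ?_
  · simpa using h.ge
  · have : (2:Nat) ^ (pvBl m + 1) = 2 * 2 ^ pvBl m := by ring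
    omega

lemma pvBl_succ_not_pow (m : Nat) (hm : 0 < m) (h : m + 1 ≠ 2 ^ pvBl m) :
    pvBl (m + 1) = pvBl m := by
  refine pvBl_eq_of _ _ (pvBl_pos m hm) ?_ ?_
  · have := pvBl_ge m hm
    omega
  · have := pvBl_lt m
    omega

-- bin(num)[2:] has length pvBl for positive numbers: length of Nat.toDigits 2
lemma pvToDigitsCore_len (f : Nat) : ∀ (n : Nat) (l : List Char), 1 ≤ n → n < f →
    (Nat.toDigitsCore 2 f n l).length = l.length + pvBl n := by
  induction f with
  | zero => intro n l h1 h2; omega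
  | succ f ih =>
    intro n l h1 h2
    rw [Nat.toDigitsCore]
    by_cases hz : n / 2 = 0
    · have hn1 : n = 1 := by omega
      subst hn1
      simp [hz, pvBl]
      decide
    · simp only [hz, if_false]
      have h1' : 1 ≤ n / 2 := by omega
      have h2' : n / 2 < f := by omega
      rw [ih (n / 2) _ h1' h2']
      have hb : pvBl n = pvBl (n / 2) + 1 := by
        simpa [pvBl] using PySem.Int.bitLength_natCast (m := n) (by omega)
      simp [List.length, hb]
      omega

lemma pvToDigits_len (n : Nat) (hn : 1 ≤ n) : (Nat.toDigits 2 n).length = pvBl n := by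
  have := pvToDigitsCore_len (n + 1) n [] hn (by omega)
  simpa [Nat.toDigits] using this

-- mod-juggling helpers (p = 1000000007 > 0)
lemma pvMod_add_left (x y : Int) : (x % 1000000007 + y) % 1000000007 = (x + y) % 1000000007 := by
  rw [Int.add_emod, Int.emod_emod_of_dvd _ dvd_rfl, ← Int.add_emod]

lemma pvMod_mul_add_left (x y z : Int) :
    (z + (x % 1000000007) * y) % 1000000007 = (z + x * y) % 1000000007 := by
  rw [Int.add_emod, Int.mul_emod, Int.emod_emod_of_dvd _ dvd_rfl, ← Int.mul_emod, ← Int.add_emod]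

lemma pvG_mod (m : Nat) : pvG m % 1000000007 = pvG m := by
  cases m with
  | zero => rfl
  | succ m => rw [pvG]; exact Int.emod_emod_of_dvd _ dvd_rfl

-- ===== A-side: the descending fold computes pvG =====
lemma pvFoldA (m : Nat) : ∀ (r : Int) (l : Nat),
    ((PySem.List.pyRange (m : Int) 0 (-1)).foldl
      (fun st num =>
        let bin_str := PySem.List.slice (PySem.Int.toBinChars0b num) (some 2) none
        let result := st.1 + (Int.shiftLeft num st.2.toNat)  -- num << len_str (len_str ≥ 0 in the loop)
        let len_str := st.2 + (bin_str.length : Int)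
        (PySem.Int.mod result 1000000007, len_str))
      (r, (l : Int))).1
    = if m = 0 then r else (r + pvG m * 2 ^ l) % 1000000007 := by
  induction m with
  | zero =>
    intro r l
    rw [PySem.List.pyRange_neg_one_eq_nil (by omega)]
    simp
  | succ m ih =>
    intro r l
    have hcons : PySem.List.pyRange ((m + 1 : Nat) : Int) 0 (-1)
        = ((m + 1 : Nat) : Int) :: PySem.List.pyRange (((m + 1 : Nat) : Int) - 1) 0 (-1) :=
      PySem.List.pyRange_neg_one_cons (by exact_mod_cast Nat.succ_pos m)
    have hpred : (((m + 1 : Nat) : Int) - 1) = (m : Int) := by push_cast; ring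
    rw [hcons, hpred, List.foldl_cons]
    -- the one step
    have hbin : (PySem.List.slice (PySem.Int.toBinChars0b ((m + 1 : Nat) : Int)) (some 2) none).length
        = pvBl (m + 1) := by
      have hnn : ¬ ((m + 1 : Nat) : Int) < 0 := by omega
      rw [show ((2 : Int)) = ((2 : Nat) : Int) from rfl, PySem.List.slice_from_natCast]
      rw [PySem.Int.toBinChars0b]
      simp only [hnn, if_false]
      rw [show (((m + 1 : Nat) : Int)).toNat = m + 1 by simp]
      simpa using pvToDigits_len (m + 1) (by omega)
    have hshift : Int.shiftLeft ((m + 1 : Nat) : Int) l = ((m : Int) + 1) * 2 ^ l := by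
      rw [show Int.shiftLeft ((m + 1 : Nat) : Int) l = ((m + 1 : Nat) : Int) <<< l from rfl,
        Int.shiftLeft_eq]
      push_cast
      ring
    simp only [hbin, Int.toNat_natCast, hshift]
    have hmod : PySem.Int.mod (r + ((m : Int) + 1) * 2 ^ l) 1000000007
        = (r + ((m : Int) + 1) * 2 ^ l) % 1000000007 :=
      PySem.Int.mod_eq_emod_of_pos (by norm_num)
    have hlen : ((l : Int) + ((pvBl (m + 1) : Nat) : Int)) = ((l + pvBl (m + 1) : Nat) : Int) := by
      push_cast; ring
    rw [hmod, hlen, ih _ (l + pvBl (m + 1))]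
    rw [if_neg (Nat.succ_ne_zero m)]
    by_cases hm : m = 0
    · subst hm
      rw [if_pos rfl, pvG, pvMod_mul_add_left, show pvG 0 = 0 from rfl]
      ring_nf
    · rw [if_neg hm, pvG, pvMod_add_left, pvMod_mul_add_left, pow_add]
      ring_nf

-- ===== B-side: the forward loop computes pvG =====
lemma pvLoopB (N : Nat) : ∀ (k m : Nat), m + k = N →
    pyAltLoop (N : Int) ((m : Int) + 1) (pvG m)
      ((2 : Int) ^ (max 1 (pvBl m))) ((2 : Int) ^ (max 1 (pvBl m))) = pvG N := by
  intro k
  induction k with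
  | zero =>
    intro m hm
    subst hm
    rw [pyAltLoop]
    simp only [Nat.add_zero]
    rw [dif_neg (by omega)]
  | succ k ih =>
    intro m hm
    have hlt : (m : Int) + 1 ≤ (N : Int) := by exact_mod_cast (by omega : m + 1 ≤ N)
    rw [pyAltLoop, dif_pos hlt]
    have hmodB : ∀ x : Int, PySem.Int.mod x 1000000007 = x % 1000000007 :=
      fun x => PySem.Int.mod_eq_emod_of_pos (by norm_num)
    have hstep : ∀ s : Int, s = (2 : Int) ^ (pvBl (m + 1)) →
        pyAltLoop (N : Int) ((m : Int) + 1 + 1)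
          ((pvG m * s + ((m : Int) + 1)) % 1000000007) s s = pvG N := by
      intro s hs
      have hres : (pvG m * s + ((m : Int) + 1)) % 1000000007 = pvG (m + 1) := by
        rw [hs, pvG]
      have hcast : ((m : Int) + 1 + 1) = (((m + 1 : Nat) : Int) + 1) := by push_cast; ring
      have hmax : s = (2 : Int) ^ (max 1 (pvBl (m + 1))) := by
        rw [hs, Nat.max_eq_right (pvBl_pos (m + 1) (by omega))]
      rw [hres, hcast, hmax]
      exact ih (m + 1) (by omega)
    by_cases hc : ((m : Int) + 1) = (2 : Int) ^ (max 1 (pvBl m))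
    · -- i hits the power-of-two boundary: the bit length grows by one
      have hbeq : (((m : Int) + 1) == (2 : Int) ^ (max 1 (pvBl m))) = true := by
        simpa [beq_iff_eq] using hc
      simp only [hbeq, if_true, hmodB]
      cases Nat.eq_zero_or_pos m with
      | inl h0 =>
        -- m = 0: i = 1 ≠ limit = 2, contradiction with hc
        exfalso
        subst h0
        rw [show max 1 (pvBl 0) = 1 from by decide] at hc
        norm_num at hc
      | inr hpos =>
        have hmax0 : max 1 (pvBl m) = pvBl m := Nat.max_eq_right (pvBl_pos m hpos)
        rw [hmax0] at hc
        have hNat : m + 1 = 2 ^ pvBl m := by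
          have : ((m + 1 : Nat) : Int) = ((2 ^ pvBl m : Nat) : Int) := by push_cast; linarith [hc]
          exact_mod_cast this
        have hbl : pvBl (m + 1) = pvBl m + 1 := pvBl_succ_pow m hpos hNat
        refine hstep _ ?_
        simp [hmax0, hbl, pow_succ]
    · have hbeq : (((m : Int) + 1) == (2 : Int) ^ (max 1 (pvBl m))) = false := by
        simpa [beq_iff_eq] using hc
      simp only [hbeq, hmodB]
      cases Nat.eq_zero_or_pos m with
      | inl h0 =>
        -- m = 0: shift stays 2 = 2^(pvBl 1)
        subst h0
        refine hstep _ ?_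
        simp [show max 1 (pvBl 0) = 1 from by decide, show pvBl 1 = 1 from by decide]
      | inr hpos =>
        have hmax0 : max 1 (pvBl m) = pvBl m := Nat.max_eq_right (pvBl_pos m hpos)
        rw [hmax0] at hc
        have hNat : m + 1 ≠ 2 ^ pvBl m := by
          intro h
          exact hc (by exact_mod_cast congrArg (Nat.cast : Nat → Int) h)
        have hbl : pvBl (m + 1) = pvBl m := pvBl_succ_not_pow m hpos hNat
        refine hstep _ ?_
        simp [hmax0, hbl]

-- ===== VERDICT (by name: the statement is the Claim_ definition above) =====
theorem concatenate_binary_time_exception_spec : Claim_equal_concatenate_binary_time_exception := by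
  intro n _
  unfold Spec_concatenate_binary_time_exception
  unfold concatenate_binary_time_exception concatenate_binary_time_exception_alt
  by_cases hn : n ≤ 0
  · rw [PySem.List.pyRange_neg_one_eq_nil hn, pyAltLoop, dif_neg (by omega)]
    rfl
  · have hN : n = ((n.toNat : Nat) : Int) := by omega
    rw [hN]
    have hA := pvFoldA n.toNat 0 0
    rw [show ((0 : Nat) : Int) = (0 : Int) from rfl] at hA
    rw [hA, if_neg (by omega)]
    have hB := pvLoopB n.toNat n.toNat 0 (by omega)
    rw [show max 1 (pvBl 0) = 1 from by decide, show pvG 0 = (0 : Int) from rfl] at hB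
    simp only [Nat.cast_zero, zero_add, pow_one] at hB
    rw [hB]
    simp [pvG_mod]
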